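-- pv_equiv track=rewrite | github.com/jlope384/Proyecto-2-IA | maze_solver/utils/maze.py | load_maze_from_text
-- ===== SOURCE A (Python) =====
-- def load_maze_from_text(text):
--     """Carga un laberinto desde texto"""
--     lines = [l.rstrip('\n') for l in text.strip().split('\n') if l.strip()]
--
--     rows = len(lines)
--     cols = max(len(l) for l in lines) if lines else 0
--     maze = []
--     start = goal = None
--
--     for r, line in enumerate(lines):
--         row = []
--         for c in range(cols):
--             ch = line[c] if c < len(line) else '1'
--             val = int(ch) if ch in '01234' else 1
--             row.append(val)
--             if ch == '2':
--                 start = (r, c)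
--             if ch == '3':
--                 goal = (r, c)
--         maze.append(row)
--
--     return maze, rows, cols, start, goal
-- ===== SOURCE B (Python) =====
-- def load_maze_from_text(text):
--     """Carga un laberinto desde texto"""
--     lines = [l for l in text.strip().split('\n') if l.strip()]
--     rows = len(lines)
--     cols = max((len(l) for l in lines), default=0)
--     maze = [[int(line[c]) if c < len(line) and line[c] in '01234' else 1
--              for c in range(cols)] for line in lines]
--
--     def find_last(target):
--         # last occurrence in row-major order = first hit of a reverse scan
--         for r in range(rows - 1, -1, -1):
--             line = lines[r]
--             for c in range(len(line) - 1, -1, -1):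
--                 if line[c] == target:
--                     return (r, c)
--         return None
--
--     return maze, rows, cols, find_last('2'), find_last('3')
-- ===== Notes on version B (the rewrite author's own statement) =====
-- stated objective: alternative
-- what changed: B builds the padded grid directly as a nested comprehension and finds start/goal by a separate reverse row-major scan that returns the first hit (equivalent to A's last-wins overwrite), instead of A's single loop threading row/start/goal state through nested folds with appends.
import Mathlib
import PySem

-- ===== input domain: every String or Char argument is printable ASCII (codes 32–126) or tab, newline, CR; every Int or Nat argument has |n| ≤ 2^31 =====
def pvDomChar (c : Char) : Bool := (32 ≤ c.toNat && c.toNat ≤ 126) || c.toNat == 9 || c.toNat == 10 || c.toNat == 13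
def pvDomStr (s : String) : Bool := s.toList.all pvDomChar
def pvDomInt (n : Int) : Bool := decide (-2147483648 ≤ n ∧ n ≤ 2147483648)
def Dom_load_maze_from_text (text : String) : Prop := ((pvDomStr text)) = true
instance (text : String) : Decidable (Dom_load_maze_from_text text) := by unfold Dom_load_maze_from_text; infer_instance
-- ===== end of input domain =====

-- B replaces A's single state-threading loop by a nested comprehension for the grid plus a
-- separate reverse row-major scan for start/goal (same return value; no speed claim).

-- ===== PORT A =====

-- exact port of l.rstrip('\n'): drop trailing '\n' characters
def pvRstripNl (cs : List Char) : List Char := (cs.reverse.dropWhile (· == '\n')).reverse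

-- lines = [l.rstrip('\n') for l in text.strip().split('\n') if l.strip()]
def pvLinesA (text : String) : List (List Char) :=
  ((PySem.Chars.splitOn (PySem.Chars.strip text.toList) ['\n']).filter
      (fun l => !(PySem.Chars.strip l).isEmpty)).map pvRstripNl

-- body of A's inner 'for c in range(cols)' loop; state = (row, start, goal)
def pvStepA (r : Int) (line : List Char)
    (st : List Int × Option (Int × Int) × Option (Int × Int)) (c : Int) :
    List Int × Option (Int × Int) × Option (Int × Int) :=
  let ch := if c < PySem.Chars.len line then PySem.List.pyGetD line c '1' else '1'
  let val := if PySem.Chars.isIn [ch] ['0', '1', '2', '3', '4'] then (PySem.Int.ofChars? [ch]).getD 1 else 1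
  (st.1 ++ [val],
   (if ch = '2' then some (r, c) else st.2.1),
   (if ch = '3' then some (r, c) else st.2.2))

def load_maze_from_text (text : String) : List (List Int) × Int × Int × (Option (Int × Int)) × (Option (Int × Int)) :=
  let lines := pvLinesA text
  let rows : Int := lines.length
  let cols : Int :=
    if lines = [] then 0
    else (PySem.List.max? (lines.map (fun l => PySem.Chars.len l)) (fun x => x)).getD 0
  let fin := (PySem.List.enumerate lines).foldl
    (fun (st : List (List Int) × Option (Int × Int) × Option (Int × Int)) rl =>
      (st.1 ++ [((PySem.List.pyRange 0 cols).foldl (pvStepA rl.1 rl.2) ([], st.2)).1],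
       ((PySem.List.pyRange 0 cols).foldl (pvStepA rl.1 rl.2) ([], st.2)).2))
    ([], none, none)
  (fin.1, rows, cols, fin.2.1, fin.2.2)

-- ===== PORT B =====

-- int(line[c]) if c < len(line) and line[c] in '01234' else 1
def pvCellB (line : List Char) (c : Int) : Int :=
  if c < PySem.Chars.len line ∧ PySem.Chars.isIn [PySem.List.pyGetD line c '1'] ['0', '1', '2', '3', '4'] = true
  then (PySem.Int.ofChars? [PySem.List.pyGetD line c '1']).getD 1 else 1

-- inner loop of find_last: first match of the reverse scan of one line (early return)
def pvFindRowB (line : List Char) (t : Char) : Option Int :=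
  (PySem.List.pyRange (PySem.Chars.len line - 1) (-1) (-1)).findSome?
    (fun c => if PySem.List.pyGetD line c ' ' = t then some c else none)

-- find_last(target): reverse scan over rows, early return on first matching cell
def pvFindLastB (lines : List (List Char)) (t : Char) : Option (Int × Int) :=
  (PySem.List.pyRange ((lines.length : Int) - 1) (-1) (-1)).findSome?
    (fun r => (pvFindRowB (PySem.List.pyGetD lines r []) t).map (fun c => (r, c)))

def load_maze_from_text_alt (text : String) : List (List Int) × Int × Int × (Option (Int × Int)) × (Option (Int × Int)) :=
  let lines := (PySem.Chars.splitOn (PySem.Chars.strip text.toList) ['\n']).filter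
      (fun l => !(PySem.Chars.strip l).isEmpty)
  let rows : Int := lines.length
  let cols : Int := (PySem.List.max? (lines.map (fun l => PySem.Chars.len l)) (fun x => x)).getD 0
  let maze := lines.map (fun line => (PySem.List.pyRange 0 cols).map (fun c => pvCellB line c))
  (maze, rows, cols, pvFindLastB lines '2', pvFindLastB lines '3')

-- ===== PRECONDITION & SPEC =====
def Spec_load_maze_from_text (text : String) (out : List (List Int) × Int × Int × (Option (Int × Int)) × (Option (Int × Int))) : Prop := out = load_maze_from_text_alt text
instance (text : String) (out : List (List Int) × Int × Int × (Option (Int × Int)) × (Option (Int × Int))) : Decidable (Spec_load_maze_from_text text out) := by unfold Spec_load_maze_from_text; infer_instance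

-- ===== CLAIM (what is proved, stated in full; the proofs are below) =====
def Claim_equal_load_maze_from_text : Prop := ∀ (text : String), Dom_load_maze_from_text text → Spec_load_maze_from_text text (load_maze_from_text text)

-- ===== LEMMAS AND PROOFS =====

-- A's cell character and the per-target hit function of A's overwrite updates
def pvChA (line : List Char) (c : Int) : Char :=
  if c < PySem.Chars.len line then PySem.List.pyGetD line c '1' else '1'

def pvG (t : Char) (r : Int) (line : List Char) (c : Int) : Option (Int × Int) :=
  if pvChA line c = t then some (r, c) else none

-- splitting on '\n' yields pieces free of '\n' (so A's rstrip('\n') is the identity on them)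
theorem pv_go_no_nl : ∀ (fuel : Nat) (l cur : List Char) (acc : List (List Char)),
    l.length < fuel → '\n' ∉ cur → (∀ p ∈ acc, '\n' ∉ p) →
    ∀ p ∈ PySem.Chars.splitOn.go ['\n'] fuel l cur acc, '\n' ∉ p := by
  intro fuel
  induction fuel with
  | zero => intro l cur acc h; omega
  | succ n ih =>
    intro l cur acc hf hcur hacc p hp
    match l with
    | [] =>
      rw [PySem.Chars.splitOn.go] at hp
      · simp at hp
        rcases hp with h | h
        · exact hacc p h
        · subst h; simpa using hcur
      · omega
    | c :: rest =>
      rw [PySem.Chars.splitOn.go] at hp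
      by_cases hpre : List.isPrefixOf ['\n'] (c :: rest)
      · simp only [hpre, if_true] at hp
        refine ih _ _ _ (by simp at hf ⊢; omega) (by simp) ?_ p hp
        intro q hq
        simp at hq
        rcases hq with h | h
        · subst h; simpa using hcur
        · exact hacc q h
      · simp only [hpre] at hp
        have hc : c ≠ '\n' := by
          intro h
          exact hpre (by simp [List.isPrefixOf, h])
        refine ih _ _ _ (by simp at hf ⊢; omega) ?_ hacc p hp
        intro h
        simp at h
        rcases h with h | h
        · exact hc h.symm
        · exact hcur h

theorem pv_splitOn_no_nl (s : List Char) : ∀ p ∈ PySem.Chars.splitOn s ['\n'], '\n' ∉ p := by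
  intro p hp
  rw [PySem.Chars.splitOn] at hp
  exact pv_go_no_nl _ _ _ _ (by omega) (by simp) (by simp) p hp

theorem pv_rstrip_id (l : List Char) (h : '\n' ∉ l) : pvRstripNl l = l := by
  unfold pvRstripNl
  have hd : l.reverse.dropWhile (· == '\n') = l.reverse := by
    cases hr : l.reverse with
    | nil => simp
    | cons x xs =>
      have hx : x ∈ l := by
        have : x ∈ l.reverse := by simp [hr]
        simpa using this
      have : ¬ (x == '\n') = true := by
        simp; intro he; exact h (he ▸ hx)
      simp [this]
  simp [hd]

theorem pv_linesA_eq (text : String) :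
    pvLinesA text = (PySem.Chars.splitOn (PySem.Chars.strip text.toList) ['\n']).filter
      (fun l => !(PySem.Chars.strip l).isEmpty) := by
  unfold pvLinesA
  rw [List.map_congr_left (fun l hl => pv_rstrip_id l
    (pv_splitOn_no_nl _ l (List.mem_of_mem_filter hl)))]
  exact List.map_id _

-- a fold that appends one cell and overwrites two Options, split into its three components
theorem pv_foldl_triple {α ρ : Type} (cs : List α) (v : α → ρ)
    (g2 g3 : α → Option (Int × Int)) (row0 : List ρ) (s0 t0 : Option (Int × Int)) :
    cs.foldl (fun (st : List ρ × Option (Int × Int) × Option (Int × Int)) c =>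
        (st.1 ++ [v c], (g2 c).or st.2.1, (g3 c).or st.2.2)) (row0, s0, t0)
    = (row0 ++ cs.map v, (cs.reverse.findSome? g2).or s0, (cs.reverse.findSome? g3).or t0) := by
  induction cs generalizing row0 s0 t0 with
  | nil => simp
  | cons c cs ih => simp [ih, List.findSome?_append, Option.or_assoc]

theorem pv_map_findSome? {α β γ : Type} (l : List α) (f : α → Option β) (h : β → γ) :
    (l.findSome? f).map h = l.findSome? (fun x => (f x).map h) := by
  induction l with
  | nil => simp
  | cons x l ih => cases hx : f x <;> simp [hx, ih]

theorem pv_findSome?_congr {α β : Type} (l : List α) (f g : α → Option β)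
    (h : ∀ x ∈ l, f x = g x) : l.findSome? f = l.findSome? g := by
  induction l with
  | nil => rfl
  | cons x l ih =>
    simp only [List.findSome?_cons, h x (by simp)]
    cases g x <;> simp [ih (fun y hy => h y (by simp [hy]))]

-- A's loop body in split form
theorem pv_stepA_form (r : Int) (line : List Char) :
    pvStepA r line = fun st c =>
      (st.1 ++ [if PySem.Chars.isIn [pvChA line c] ['0', '1', '2', '3', '4']
                then (PySem.Int.ofChars? [pvChA line c]).getD 1 else 1],
       (pvG '2' r line c).or st.2.1, (pvG '3' r line c).or st.2.2) := by
  funext st c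
  unfold pvStepA pvG pvChA
  dsimp only
  split_ifs <;> rfl

-- A's cell value equals B's comprehension cell
theorem pv_cell_eq (line : List Char) (c : Int) :
    (if PySem.Chars.isIn [pvChA line c] ['0', '1', '2', '3', '4']
     then (PySem.Int.ofChars? [pvChA line c]).getD 1 else 1)
    = pvCellB line c := by
  unfold pvChA pvCellB
  by_cases hlt : c < PySem.Chars.len line
  · rw [if_pos hlt]
    by_cases hin : PySem.Chars.isIn [PySem.List.pyGetD line c '1'] ['0', '1', '2', '3', '4'] = true
    · rw [if_pos hin, if_pos ⟨hlt, hin⟩]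
    · rw [if_neg hin, if_neg (fun h => hin h.2)]
  · rw [if_neg hlt,
        if_pos (show PySem.Chars.isIn ['1'] ['0', '1', '2', '3', '4'] = true by decide),
        if_neg (show ¬(c < PySem.Chars.len line ∧
          PySem.Chars.isIn [PySem.List.pyGetD line c '1'] ['0', '1', '2', '3', '4'] = true)
          from fun h => hlt h.1)]
    decide

-- the reverse scan of A's hits over range(cols) equals B's reverse scan over range(len(line))
theorem pv_rowfind_eq (line : List Char) (r cols : Int) (hc : PySem.Chars.len line ≤ cols)
    (t : Char) (ht : t ≠ '1') :
    ((PySem.List.pyRange 0 cols).reverse.findSome? (pvG t r line))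
    = (pvFindRowB line t).map (fun c => (r, c)) := by
  unfold pvFindRowB
  rw [PySem.List.pyRange_neg_one_eq_reverse]
  have h1 : (-1 : Int) + 1 = 0 := by norm_num
  have h2 : PySem.Chars.len line - 1 + 1 = PySem.Chars.len line := by ring
  rw [h1, h2, pv_map_findSome?]
  have hlen : (0 : Int) ≤ PySem.Chars.len line := by simp [PySem.Chars.len_eq]
  rw [PySem.List.pyRange_one_append 0 (PySem.Chars.len line) cols hlen hc,
      List.reverse_append, List.findSome?_append]
  have hnone : (PySem.List.pyRange (PySem.Chars.len line) cols).reverse.findSome?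
      (pvG t r line) = none := by
    rw [List.findSome?_eq_none_iff]
    intro c hcmem
    rw [List.mem_reverse, PySem.List.mem_pyRange_one] at hcmem
    have hnlt : ¬ (c < PySem.Chars.len line) := by omega
    unfold pvG pvChA
    rw [if_neg hnlt, if_neg (Ne.symm ht)]
  rw [hnone, Option.none_or]
  apply pv_findSome?_congr
  intro c hcmem
  rw [List.mem_reverse, PySem.List.mem_pyRange_one] at hcmem
  obtain ⟨hc0, hclt⟩ := hcmem
  have hlt : c < (line.length : Int) := by simpa [PySem.Chars.len_eq] using hclt
  unfold pvG pvChA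
  rw [if_pos hclt,
      PySem.List.pyGetD_eq_getElem line '1' hc0 hlt,
      PySem.List.pyGetD_eq_getElem line ' ' hc0 hlt]
  split_ifs <;> simp

-- the reverse row scan over enumerate equals B's find_last
theorem pv_findlast_eq (lines : List (List Char)) (t : Char) :
    ((PySem.List.enumerate lines).reverse.findSome?
      (fun rl => (pvFindRowB rl.2 t).map (fun c => (rl.1, c))))
    = pvFindLastB lines t := by
  unfold pvFindLastB
  rw [PySem.List.pyRange_neg_one_eq_reverse]
  have h1 : (-1 : Int) + 1 = 0 := by norm_num
  have h2 : ((lines.length : Int)) - 1 + 1 = (lines.length : Int) := by ring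
  rw [h1, h2]
  rw [PySem.List.enumerate_eq_map_pyRange lines [], PySem.List.len_eq,
      ← List.map_reverse, List.findSome?_map]
  rfl

-- A's whole loop nest equals B's comprehension plus two reverse scans
theorem pv_main (lines : List (List Char)) (cols : Int)
    (hcols : ∀ l ∈ lines, PySem.Chars.len l ≤ cols) :
    (PySem.List.enumerate lines).foldl
      (fun (st : List (List Int) × Option (Int × Int) × Option (Int × Int)) rl =>
        (st.1 ++ [((PySem.List.pyRange 0 cols).foldl (pvStepA rl.1 rl.2) ([], st.2)).1],
         ((PySem.List.pyRange 0 cols).foldl (pvStepA rl.1 rl.2) ([], st.2)).2))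
      ([], none, none)
    = (lines.map (fun line => (PySem.List.pyRange 0 cols).map (fun c => pvCellB line c)),
       pvFindLastB lines '2', pvFindLastB lines '3') := by
  have hcong : ∀ (st : List (List Int) × Option (Int × Int) × Option (Int × Int)),
      ∀ rl ∈ PySem.List.enumerate lines,
      (st.1 ++ [((PySem.List.pyRange 0 cols).foldl (pvStepA rl.1 rl.2) ([], st.2)).1],
       ((PySem.List.pyRange 0 cols).foldl (pvStepA rl.1 rl.2) ([], st.2)).2)
      = (st.1 ++ [(PySem.List.pyRange 0 cols).map (fun c => pvCellB rl.2 c)],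
         ((pvFindRowB rl.2 '2').map (fun c => (rl.1, c))).or st.2.1,
         ((pvFindRowB rl.2 '3').map (fun c => (rl.1, c))).or st.2.2) := by
    intro st rl hmem
    have hl : rl.2 ∈ lines := by
      rw [PySem.List.mem_enumerate_iff] at hmem
      obtain ⟨k, hk, rfl⟩ := hmem
      exact List.getElem_mem _
    have hc := hcols _ hl
    rw [pv_stepA_form, pv_foldl_triple]
    refine congrArg₂ _ ?_ (congrArg₂ _ ?_ ?_)
    · rw [List.nil_append]
      exact congrArg (fun x => st.1 ++ [x]) (List.map_congr_left (fun c _ => pv_cell_eq rl.2 c))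
    · rw [pv_rowfind_eq rl.2 rl.1 cols hc '2' (by decide)]
    · rw [pv_rowfind_eq rl.2 rl.1 cols hc '3' (by decide)]
  rw [PySem.List.foldl_congr_mem _ _ _ _ hcong, pv_foldl_triple]
  refine congrArg₂ _ ?_ (congrArg₂ _ ?_ ?_)
  · rw [List.nil_append]
    conv_rhs => rw [← PySem.List.map_snd_enumerate lines 0, List.map_map]
    rfl
  · rw [pv_findlast_eq, Option.or_none]
  · rw [pv_findlast_eq, Option.or_none]

-- ===== VERDICT (by name: the statement is the Claim_ definition above) =====
theorem load_maze_from_text_spec : Claim_equal_load_maze_from_text := by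
  intro text _
  unfold Spec_load_maze_from_text load_maze_from_text load_maze_from_text_alt
  rw [pv_linesA_eq]
  dsimp only
  set L := (PySem.Chars.splitOn (PySem.Chars.strip text.toList) ['\n']).filter
      (fun l => !(PySem.Chars.strip l).isEmpty) with hL
  have hcA : (if L = [] then 0
      else (PySem.List.max? (L.map (fun l => PySem.Chars.len l)) (fun x => x)).getD 0)
      = (PySem.List.max? (L.map (fun l => PySem.Chars.len l)) (fun x => x)).getD 0 := by
    by_cases h : L = []
    · rw [if_pos h, h]
      simp [(PySem.List.max?_eq_none_iff ([] : List Int) (fun x => x)).mpr rfl]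
    · rw [if_neg h]
  have hcols : ∀ l ∈ L, PySem.Chars.len l ≤
      (PySem.List.max? (L.map (fun l => PySem.Chars.len l)) (fun x => x)).getD 0 := by
    intro l hl
    cases hm : PySem.List.max? (L.map (fun l => PySem.Chars.len l)) (fun x => x) with
    | none =>
      rw [PySem.List.max?_eq_none_iff] at hm
      exact absurd hl (by simp [List.map_eq_nil_iff.mp hm])
    | some m =>
      have := PySem.List.max?_isMax hm (PySem.Chars.len l) (List.mem_map_of_mem hl)
      simpa using this
  rw [hcA, pv_main L _ hcols]
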